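-- pv_equiv track=rewrite | github.com/rndmcnlly/gws-toolkit | gws_toolkit.py | _format_values_grid
-- ===== SOURCE A (Python) =====
-- def _format_values_grid(values: list, range_label: str = "") -> str:
--     """Format a 2D values array as a readable aligned table."""
--     if not values:
--         return f"{range_label}: (empty)" if range_label else "(empty range)"
--
--     # Compute column widths
--     max_cols = max(len(row) for row in values)
--     widths = [0] * max_cols
--     for row in values:
--         for i, cell in enumerate(row):
--             widths[i] = max(widths[i], len(str(cell)))
--
--     # Cap column widths at 40 chars for readability
--     widths = [min(w, 40) for w in widths]
--
--     lines = []
--     if range_label: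
--         lines.append(f"{range_label} ({len(values)} rows):")
--
--     for row_idx, row in enumerate(values):
--         cells = []
--         for i in range(max_cols):
--             val = str(row[i]) if i < len(row) else ""
--             if len(val) > 40:
--                 val = val[:37] + "..."
--             cells.append(val.ljust(widths[i]))
--         lines.append("  " + " | ".join(cells))
--
--         # Separator after first row (headers)
--         if row_idx == 0:
--             lines.append("  " + "-+-".join("-" * w for w in widths))
--
--         # Truncate output for very large ranges
--         if row_idx >= 99:
--             lines.append(f"  ... ({len(values) - 100} more rows)")
--             break
--
--     return "\n".join(lines)
-- ===== SOURCE B (Python) =====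
-- def _format_values_grid(values: list, range_label: str = "") -> str:
--     """Format a 2D values array as a readable aligned table (render-first decomposition)."""
--     if not values:
--         return f"{range_label}: (empty)" if range_label else "(empty range)"
--
--     def render(cell):
--         s = str(cell)
--         return s[:37] + "..." if len(s) > 40 else s
--
--     max_cols = max(len(row) for row in values)
--     # Rectangular matrix of rendered cells, short rows padded with ''
--     rendered = [[render(c) for c in row] + [""] * (max_cols - len(row)) for row in values]
--     # Column widths straight off the rendered matrix
--     widths = [max(len(r[i]) for r in rendered) for i in range(max_cols)]
--
--     def fmt(row):
--         return "  " + " | ".join(c + " " * (w - len(c)) for c, w in zip(row, widths))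
--
--     lines = []
--     if range_label:
--         lines.append(f"{range_label} ({len(values)} rows):")
--     lines.append(fmt(rendered[0]))
--     lines.append("  " + "-+-".join("-" * w for w in widths))
--     lines.extend(fmt(r) for r in rendered[1:100])
--     if len(values) > 99:
--         lines.append(f"  ... ({len(values) - 100} more rows)")
--     return "\n".join(lines)
-- ===== Notes on version B (the rewrite author's own statement) =====
-- stated objective: alternative
-- what changed: B first builds a rectangular matrix of rendered (truncated, padded) cell strings, reads each column width as the max length over that matrix, and emits header/separator, a slice of the first 100 rendered rows and the tail line, replacing A's two row-major passes (index-updated widths array, then an indexed render loop with a break).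
import Mathlib
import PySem

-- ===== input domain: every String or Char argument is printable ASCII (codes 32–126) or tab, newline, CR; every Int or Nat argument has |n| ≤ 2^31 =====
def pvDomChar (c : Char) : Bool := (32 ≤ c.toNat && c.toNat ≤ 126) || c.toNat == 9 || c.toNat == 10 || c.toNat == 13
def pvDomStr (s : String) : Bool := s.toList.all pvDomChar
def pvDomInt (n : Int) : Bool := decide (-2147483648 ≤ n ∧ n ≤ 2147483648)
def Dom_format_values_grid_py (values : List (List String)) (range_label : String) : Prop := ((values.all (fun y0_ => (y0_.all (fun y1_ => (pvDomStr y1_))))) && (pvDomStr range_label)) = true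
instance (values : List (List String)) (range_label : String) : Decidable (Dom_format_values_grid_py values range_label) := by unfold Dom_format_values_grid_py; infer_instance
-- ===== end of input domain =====

-- B renders every cell first (truncated rectangular matrix), reads the column widths off
-- the rendered matrix, and emits header/separator/body/tail by slicing instead of A's
-- indexed row loop with a break; same output ('alternative' decomposition, no speed claim).

-- ===== PORT A =====
-- 'for i, cell in enumerate(row): widths[i] = max(widths[i], len(str(cell)))'
def pvAInner (ws : List Nat) (i : Nat) : List String → List Nat
  | [] => ws
  | cell :: rest =>
      pvAInner (PySem.List.pySetD ws (i : Int)
        (max (PySem.List.pyGetD ws (i : Int) 0) cell.toList.length)) (i + 1) rest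

-- 'for row in values:' (widths pass)
def pvAWidths (ws : List Nat) : List (List String) → List Nat
  | [] => ws
  | row :: rest => pvAWidths (pvAInner ws 0 row) rest

-- 'val = str(row[i]) if i < len(row) else ""'
def pvACellVal (row : List String) (i : Int) : List Char :=
  if i < (row.length : Int) then (PySem.List.pyGetD row i "").toList else "".toList

-- 'if len(val) > 40: val = val[:37] + "..."'
def pvATrunc (val : List Char) : List Char :=
  if val.length > 40 then PySem.List.slice val none (some (37 : Int)) ++ "...".toList else val

-- body of the row loop: cells over range(max_cols) (val, truncate, ljust), then '  ' + ' | '.join(cells)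
-- val.ljust(widths[i]) is right-padding with spaces (exact: the width is a Nat)
def pvALine (widths : List Nat) (max_cols : Nat) (row : List String) : List Char :=
  "  ".toList ++ PySem.Chars.join " | ".toList
    ((PySem.List.pyRange 0 (max_cols : Int) 1).map (fun i =>
      pvATrunc (pvACellVal row i) ++
        List.replicate (PySem.List.pyGetD widths i 0 - (pvATrunc (pvACellVal row i)).length) ' '))

-- 'for row_idx, row in enumerate(values):' with the separator after row 0 and the break at 99
def pvALoop (widths : List Nat) (max_cols total : Nat) (row_idx : Nat) : List (List String) → List (List Char)
  | [] => []
  | row :: rest =>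
      pvALine widths max_cols row ::
        ((if row_idx = 0 then
            ["  ".toList ++ PySem.Chars.join "-+-".toList (widths.map (fun w => List.replicate w '-'))]
          else []) ++
         (if row_idx ≥ 99 then
            ["  ... (".toList ++ PySem.Int.toChars ((total : Int) - 100) ++ " more rows)".toList]
          else pvALoop widths max_cols total (row_idx + 1) rest))

def format_values_grid_py (values : List (List String)) (range_label : String) : String :=
  if values = [] then
    if range_label ≠ "" then String.ofList (range_label.toList ++ ": (empty)".toList) else "(empty range)"
  else
    -- max(len(row) for row in values); values is nonempty here, so a 0 seed is exact
    let max_cols := (values.map (fun row => row.length)).foldl max 0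
    let widths := pvAWidths (List.replicate max_cols 0) values
    let widths := widths.map (fun w => min w 40)
    let lines := (if range_label ≠ "" then
        [range_label.toList ++ " (".toList ++ PySem.Int.toChars (values.length : Int) ++ " rows):".toList]
      else [])
      ++ pvALoop widths max_cols values.length 0 values
    String.ofList (PySem.Chars.join ['\n'] lines)

-- ===== PORT B =====
-- render(cell): str(cell) truncated to 37+'...' when longer than 40
def pvBRender (s : List Char) : List Char :=
  if s.length > 40 then PySem.List.slice s none (some (37 : Int)) ++ "...".toList else s

-- fmt(row): '  ' + ' | '.join(c + ' '*(w-len(c)) for c, w in zip(row, widths))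
def pvBFmt (widths : List Nat) (row : List (List Char)) : List Char :=
  "  ".toList ++ PySem.Chars.join " | ".toList
    ((row.zip widths).map (fun cw => cw.1 ++ List.replicate (cw.2 - cw.1.length) ' '))

def format_values_grid_py_alt (values : List (List String)) (range_label : String) : String :=
  if values = [] then
    if range_label ≠ "" then String.ofList (range_label.toList ++ ": (empty)".toList) else "(empty range)"
  else
    let max_cols := (values.map (fun row => row.length)).foldl max 0
    -- rectangular rendered matrix, short rows padded with ''
    let rendered := values.map (fun row =>
      row.map (fun c => pvBRender c.toList) ++ List.replicate (max_cols - row.length) [])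
    -- widths[i] = max(len(r[i]) for r in rendered); rendered is nonempty, 0 seed exact
    let widths := (PySem.List.pyRange 0 (max_cols : Int) 1).map (fun i =>
      (rendered.map (fun r => (PySem.List.pyGetD r i []).length)).foldl max 0)
    let lines := (if range_label ≠ "" then
        [range_label.toList ++ " (".toList ++ PySem.Int.toChars (values.length : Int) ++ " rows):".toList]
      else [])
      ++ [pvBFmt widths (PySem.List.pyGetD rendered 0 []),
          "  ".toList ++ PySem.Chars.join "-+-".toList (widths.map (fun w => List.replicate w '-'))]
      ++ (PySem.List.slice rendered (some (1 : Int)) (some (100 : Int))).map (pvBFmt widths)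
      ++ (if values.length > 99 then
            ["  ... (".toList ++ PySem.Int.toChars ((values.length : Int) - 100) ++ " more rows)".toList]
          else [])
    String.ofList (PySem.Chars.join ['\n'] lines)

-- ===== PRECONDITION & SPEC =====
def Spec_format_values_grid_py (values : List (List String)) (range_label : String) (out : String) : Prop := out = format_values_grid_py_alt values range_label
instance (values : List (List String)) (range_label : String) (out : String) : Decidable (Spec_format_values_grid_py values range_label out) := by unfold Spec_format_values_grid_py; infer_instance

-- ===== CLAIM (what is proved, stated in full; the proofs are below) =====
def Claim_equal_format_values_grid_py : Prop := ∀ (values : List (List String)) (range_label : String), Dom_format_values_grid_py values range_label → Spec_format_values_grid_py values range_label (format_values_grid_py values range_label)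

-- ===== LEMMAS AND PROOFS =====

theorem pvAInner_length (row : List String) (ws : List Nat) (i : Nat) :
    (pvAInner ws i row).length = ws.length := by
  induction row generalizing ws i with
  | nil => rfl
  | cons c rest ih => simp [pvAInner, ih]

theorem pvAInner_getD (row : List String) (ws : List Nat) (i j : Nat)
    (h : i + row.length ≤ ws.length) :
    (pvAInner ws i row).getD j 0 =
      if i ≤ j ∧ j < i + row.length then
        max (ws.getD j 0) ((row.getD (j - i) "").toList.length)
      else ws.getD j 0 := by
  induction row generalizing ws i with
  | nil => simp [pvAInner]
  | cons c rest ih =>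
    simp only [List.length_cons] at h
    rw [show pvAInner ws i (c :: rest) = pvAInner (PySem.List.pySetD ws (i : Int)
        (max (PySem.List.pyGetD ws (i : Int) 0) c.toList.length)) (i + 1) rest from rfl]
    simp only [PySem.List.pySetD_natCast, PySem.List.pyGetD_natCast]
    rw [ih _ (i + 1) (by simp; omega)]
    simp only [List.getD_eq_getElem?_getD, List.getElem?_set, List.length_cons]
    split_ifs with g1 g2 g3 g4 g5 g6 g7 g8 <;>
      first
      | omega
      | (rw [show j - i = (j - (i + 1)) + 1 by omega]; simp)
      | (simp_all; try omega)

theorem pvAWidths_length (values : List (List String)) (ws : List Nat) :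
    (pvAWidths ws values).length = ws.length := by
  induction values generalizing ws with
  | nil => rfl
  | cons row rest ih => simp [pvAWidths, ih, pvAInner_length]

-- the widths pass, per column: a running maximum of the cell lengths
theorem pvAWidths_getD (values : List (List String)) (ws : List Nat) (j : Nat)
    (h : ∀ row ∈ values, row.length ≤ ws.length) :
    (pvAWidths ws values).getD j 0 =
      (values.map (fun row => (row.map (fun c => c.toList.length)).getD j 0)).foldl max (ws.getD j 0) := by
  induction values generalizing ws with
  | nil => rfl
  | cons row rest ih =>
    simp only [pvAWidths, List.map_cons, List.foldl_cons]
    rw [ih _ (fun r hr => by rw [pvAInner_length]; exact h r (List.mem_cons_of_mem _ hr))]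
    congr 1
    rw [pvAInner_getD _ _ _ _ (by simpa using h row (List.mem_cons_self))]
    by_cases hj : j < row.length
    · rw [if_pos (by omega), Nat.sub_zero]
      congr 1
      rw [List.getD_eq_getElem row "" hj,
        List.getD_eq_getElem _ _
          (show j < (row.map (fun c : String => c.toList.length)).length by simpa using hj)]
      simp
    · rw [if_neg (by omega)]
      rw [show (row.map (fun c : String => c.toList.length)).getD j 0 = 0 from by
        rw [List.getD_eq_getElem?_getD, List.getElem?_eq_none
          (show (row.map (fun c : String => c.toList.length)).length ≤ j by
            simpa using (by omega : row.length ≤ j))]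
        rfl]
      simp

theorem pvMinFoldMax (l : List Nat) (a : Nat) :
    (l.map (fun x => min x 40)).foldl max (min a 40) = min (l.foldl max a) 40 := by
  induction l generalizing a with
  | nil => rfl
  | cons x xs ih =>
    simp only [List.map_cons, List.foldl_cons]
    rw [show max (min a 40) (min x 40) = min (max a x) 40 by omega, ih]

theorem pvBRender_length (s : List Char) : (pvBRender s).length = min s.length 40 := by
  unfold pvBRender
  by_cases h : s.length > 40
  · rw [if_pos h, PySem.List.slice_to _ (by omega)]
    simp
    omega
  · rw [if_neg h]
    omega

-- the widths the two ports compute coincide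
theorem pvWidths_eq (values : List (List String))
    (h : ∀ row ∈ values, row.length ≤ (values.map (fun row => row.length)).foldl max 0) :
    ((pvAWidths (List.replicate ((values.map (fun row => row.length)).foldl max 0) 0) values).map
        (fun w => min w 40)) =
      (PySem.List.pyRange 0 (((values.map (fun row => row.length)).foldl max 0 : Nat) : Int) 1).map (fun i =>
        ((values.map (fun row =>
            row.map (fun c => pvBRender c.toList) ++
              List.replicate ((values.map (fun row => row.length)).foldl max 0 - row.length) [])).map
          (fun r => (PySem.List.pyGetD r i []).length)).foldl max 0) := by
  set n := (values.map (fun row => row.length)).foldl max 0 with hn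
  rw [PySem.List.pyRange_zero_nat, List.map_map]
  apply List.ext_getElem
  · simp [pvAWidths_length]
  · intro k h1 h2
    have hk : k < n := by simpa [pvAWidths_length] using h1
    rw [List.getElem_map, List.getElem_map, List.getElem_range]
    rw [← List.getD_eq_getElem (pvAWidths (List.replicate n 0) values) 0
      (by simpa [pvAWidths_length] using hk)]
    rw [pvAWidths_getD _ _ _ (fun r hr => by simpa using h r hr)]
    simp only [Function.comp, PySem.List.pyGetD_natCast, List.map_map]
    rw [show (List.replicate n 0).getD k 0 = 0 by simp]
    rw [show (0 : Nat) = min 0 40 from rfl, ← pvMinFoldMax, List.map_map]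
    congr 1
    apply List.map_congr_left
    intro row hrow
    have hrn : row.length ≤ n := h row hrow
    simp only [Function.comp]
    by_cases hj : k < row.length
    · rw [List.getD_eq_getElem _ _
        (show k < (row.map (fun c : String => c.toList.length)).length by simpa using hj)]
      rw [List.getD_eq_getElem _ _
        (show k < (row.map (fun c => pvBRender c.toList) ++
            List.replicate (n - row.length) ([] : List Char)).length by simp; omega)]
      rw [List.getElem_append_left (by simpa using hj)]
      simp [pvBRender_length]
    · rw [List.getD_eq_getElem?_getD,
        List.getElem?_eq_none (show (row.map (fun c : String => c.toList.length)).length ≤ k by simpa using (by omega : row.length ≤ k)),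
        List.getD_eq_getElem?_getD]
      by_cases hkn : k < n
      · rw [List.getElem?_append_right (by simpa using hj),
          List.getElem?_eq_getElem (by simp [List.length_replicate]; omega)]
        simp
      · rw [List.getElem?_eq_none (by simp; omega)]
        simp

-- A's per-row line = B's fmt of the rendered, padded row
theorem pvLine_eq (W : List Nat) (n : Nat) (row : List String)
    (hW : W.length = n) (hr : row.length ≤ n) :
    pvALine W n row =
      pvBFmt W (row.map (fun c => pvBRender c.toList) ++ List.replicate (n - row.length) []) := by
  unfold pvALine pvBFmt
  congr 1
  congr 1
  rw [PySem.List.pyRange_zero_nat, List.map_map]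
  apply List.ext_getElem
  · simp [hW]
    omega
  · intro k h1 h2
    have hk : k < n := by simpa using h1
    rw [List.getElem_map, List.getElem_map, List.getElem_range, List.getElem_zip]
    simp only [Function.comp]
    have hWk : PySem.List.pyGetD W ((k : Nat) : Int) 0 = W[k]'(by omega) := by
      rw [PySem.List.pyGetD_natCast]
      exact List.getD_eq_getElem W 0 (by omega)
    by_cases hj : k < row.length
    · have hv : pvACellVal row ((k : Nat) : Int) = (row[k]'hj).toList := by
        unfold pvACellVal
        rw [if_pos (by exact_mod_cast hj), PySem.List.pyGetD_natCast,
          List.getD_eq_getElem row "" hj]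
      have hget : (row.map (fun c => pvBRender c.toList) ++
          List.replicate (n - row.length) ([] : List Char))[k]'(by simp; omega)
          = pvBRender (row[k]'hj).toList := by
        rw [List.getElem_append_left (by simpa using hj)]
        simp
      rw [hv, hget, hWk]
      rfl
    · have hv : pvACellVal row ((k : Nat) : Int) = [] := by
        unfold pvACellVal
        rw [if_neg (by exact_mod_cast hj)]
        rfl
      have hget : (row.map (fun c => pvBRender c.toList) ++
          List.replicate (n - row.length) ([] : List Char))[k]'(by simp; omega)
          = ([] : List Char) := by
        rw [List.getElem_append_right (by simpa using hj)]
        simp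
      rw [hv, hget, hWk]
      rfl

-- A's break-at-99 loop, from index ≥ 1, is a take + optional tail line
theorem pvALoop_eq (W : List Nat) (n total : Nat) (rest : List (List String)) (idx : Nat)
    (h1 : 1 ≤ idx) (h2 : idx ≤ 99) :
    pvALoop W n total idx rest =
      (rest.take (100 - idx)).map (pvALine W n) ++
        (if 100 - idx ≤ rest.length then
          ["  ... (".toList ++ PySem.Int.toChars ((total : Int) - 100) ++ " more rows)".toList]
        else []) := by
  induction rest generalizing idx with
  | nil =>
    rw [show pvALoop W n total idx [] = [] from rfl,
      if_neg (by simp only [List.length_nil]; omega)]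
    simp
  | cons r rs ih =>
    rw [show pvALoop W n total idx (r :: rs) =
        pvALine W n r ::
          ((if idx = 0 then
              ["  ".toList ++ PySem.Chars.join "-+-".toList (W.map (fun w => List.replicate w '-'))]
            else []) ++
           (if idx ≥ 99 then
              ["  ... (".toList ++ PySem.Int.toChars ((total : Int) - 100) ++ " more rows)".toList]
            else pvALoop W n total (idx + 1) rs)) from rfl]
    rw [if_neg (by omega)]
    by_cases h99 : idx = 99
    · subst h99
      rw [if_pos (by omega), show (100 : Nat) - 99 = 1 from rfl,
        if_pos (by simp)]
      simp
    · rw [if_neg (by omega), ih (idx + 1) (by omega) (by omega),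
        show (100 : Nat) - idx = (100 - (idx + 1)) + 1 by omega]
      simp only [List.take_succ_cons, List.map_cons, List.cons_append, List.nil_append,
        List.length_cons]
      by_cases hc : 100 - (idx + 1) ≤ rs.length
      · rw [if_pos hc, if_pos (by omega)]
      · rw [if_neg hc, if_neg (by omega)]

theorem format_values_grid_py_eq (values : List (List String)) (range_label : String) :
    format_values_grid_py values range_label = format_values_grid_py_alt values range_label := by
  cases values with
  | nil => rfl
  | cons v vs =>
    simp only [format_values_grid_py, format_values_grid_py_alt]
    rw [if_neg (show ¬(v :: vs = []) from by simp),
      if_neg (show ¬(v :: vs = []) from by simp)]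
    set vals := v :: vs with hvals
    set n := (vals.map (fun row => row.length)).foldl max 0 with hn
    have hmax : ∀ row ∈ vals, row.length ≤ n := by
      intro row hrow
      exact (PySem.List.le_foldl_max (vals.map (fun row => row.length)) 0).2 _
        (List.mem_map_of_mem hrow)
    set W := (pvAWidths (List.replicate n 0) vals).map (fun w => min w 40) with hW
    have hWlen : W.length = n := by simp [hW, pvAWidths_length]
    have hWeq := pvWidths_eq vals hmax
    rw [← hn, ← hW] at hWeq
    rw [← hWeq]
    congr 2
    rw [show pvALoop W n vals.length 0 vals =
        pvALine W n v ::
          ("  ".toList ++ PySem.Chars.join "-+-".toList (W.map (fun w => List.replicate w '-'))) ::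
          pvALoop W n vals.length 1 vs from rfl]
    rw [pvALoop_eq W n vals.length vs 1 (by omega) (by omega)]
    rw [show PySem.List.pyGetD (vals.map (fun row =>
          row.map (fun c => pvBRender c.toList) ++ List.replicate (n - row.length) [])) 0 [] =
        v.map (fun c => pvBRender c.toList) ++ List.replicate (n - v.length) [] from by
      rw [hvals]
      simp [PySem.List.pyGetD_zero_cons]]
    rw [show PySem.List.slice (vals.map (fun row =>
          row.map (fun c => pvBRender c.toList) ++ List.replicate (n - row.length) []))
          (some (1 : Int)) (some (100 : Int)) =
        (vs.take 99).map (fun row =>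
          row.map (fun c => pvBRender c.toList) ++ List.replicate (n - row.length) []) from by
      rw [PySem.List.slice_toNat _ (by omega) (by omega), hvals]
      simp [List.map_take]]
    rw [← pvLine_eq W n v hWlen (hmax v (by rw [hvals]; exact List.mem_cons_self))]
    rw [show ((vs.take 99).map (fun row =>
          row.map (fun c => pvBRender c.toList) ++ List.replicate (n - row.length) [])).map (pvBFmt W) =
        (vs.take 99).map (pvALine W n) from by
      rw [List.map_map]
      exact List.map_congr_left (fun row hrow =>
        (pvLine_eq W n row hWlen (hmax row (by
          rw [hvals]; exact List.mem_cons_of_mem _ (List.mem_of_mem_take hrow)))).symm)]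
    rw [show ((if vals.length > 99 then
          ["  ... (".toList ++ PySem.Int.toChars ((vals.length : Int) - 100) ++ " more rows)".toList]
        else []) : List (List Char)) =
        (if 100 - 1 ≤ vs.length then
          ["  ... (".toList ++ PySem.Int.toChars ((vals.length : Int) - 100) ++ " more rows)".toList]
        else []) from by
      by_cases hc : 100 - 1 ≤ vs.length
      · rw [if_pos hc, if_pos (by rw [hvals]; simp; omega)]
      · rw [if_neg hc, if_neg (by rw [hvals]; simp; omega)]]
    simp

-- ===== VERDICT (by name: the statement is the Claim_ definition above) =====
theorem format_values_grid_py_spec : Claim_equal_format_values_grid_py := by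
  intro values range_label _
  unfold Spec_format_values_grid_py
  exact format_values_grid_py_eq values range_label
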